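-- pv_equiv track=rewrite | github.com/rara0857/2025_DSS_Final | utils.py | get_longest_period_2
-- ===== SOURCE A (Python) =====
-- def get_longest_period_2(u):
--     if not u:
--         return 0
--     n = len(u)
--     max_len = 0
--     for i in range(n):
--         for j in range(i, n):
--             sub = u[i:j+1]
--             is_period_2 = True
--             if len(sub) > 2:
--                 for k in range(len(sub) - 2):
--                     if sub[k] != sub[k+2]:
--                         is_period_2 = False
--                         break
--             if is_period_2:
--                 max_len = max(max_len, len(sub))
--     return max_len
-- ===== SOURCE B (Python) =====
-- def get_longest_period_2(u):
--     best = 0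
--     cur = 0
--     for k in range(len(u)):
--         if k >= 2 and u[k] == u[k - 2]:
--             cur += 1
--         else:
--             cur = min(k + 1, 2)
--         if cur > best:
--             best = cur
--     return best
-- ===== Notes on version B (the rewrite author's own statement) =====
-- stated objective: faster
-- what changed: Replaced the enumerate-all-substrings-and-recheck triple loop by a single left-to-right pass maintaining the length of the longest period-2 suffix ending at each index (extend by one when u[k]==u[k-2], else reset to min(k+1,2)) and its running maximum.
import Mathlib
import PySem

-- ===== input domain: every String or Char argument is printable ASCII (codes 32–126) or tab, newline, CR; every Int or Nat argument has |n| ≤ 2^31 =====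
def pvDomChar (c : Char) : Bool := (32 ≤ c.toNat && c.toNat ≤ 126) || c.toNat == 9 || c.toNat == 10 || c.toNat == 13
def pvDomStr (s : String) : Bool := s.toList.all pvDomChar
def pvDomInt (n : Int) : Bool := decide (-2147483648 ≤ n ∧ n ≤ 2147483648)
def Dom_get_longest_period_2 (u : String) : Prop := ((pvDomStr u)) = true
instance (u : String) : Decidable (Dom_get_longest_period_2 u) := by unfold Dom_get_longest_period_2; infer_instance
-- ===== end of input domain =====

-- B replaces A's enumerate-all-substrings triple loop by a single left-to-right pass
-- tracking the longest period-2 suffix at each index; objective: faster.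

-- ===== PORT A =====
-- inner 'for k … if sub[k] != sub[k+2]: … break' loop of A (break = stop, returning False)
def pvCheckP2 (sub : List Char) : List Int → Bool
  | [] => true
  | k :: ks =>
    if PySem.List.pyGet? sub k ≠ PySem.List.pyGet? sub (k + 2) then false
    else pvCheckP2 sub ks

def get_longest_period_2 (u : String) : Int :=
  let l := u.toList
  if l = [] then 0
  else
    let n : Int := l.length
    (PySem.List.pyRange 0 n 1).foldl (fun max_len i =>
      (PySem.List.pyRange i n 1).foldl (fun max_len j =>
        let sub := PySem.List.slice l (some i) (some (j + 1))
        let is_period_2 : Bool :=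
          if (sub.length : Int) > 2 then
            pvCheckP2 sub (PySem.List.pyRange 0 ((sub.length : Int) - 2) 1)
          else true
        if is_period_2 then max max_len (sub.length : Int) else max_len) max_len) 0

-- ===== PORT B =====
def get_longest_period_2_alt (u : String) : Int :=
  let l := u.toList
  let res := (PySem.List.pyRange 0 (l.length : Int) 1).foldl (fun (st : Int × Int) k =>
      let cur : Int :=
        if 2 ≤ k ∧ PySem.List.pyGet? l k = PySem.List.pyGet? l (k - 2) then st.2 + 1
        else min (k + 1) 2
      (if cur > st.1 then cur else st.1, cur)) (0, 0)
  res.1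

-- ===== PRECONDITION & SPEC =====
def Spec_get_longest_period_2 (u : String) (out : Int) : Prop := out = get_longest_period_2_alt u
instance (u : String) (out : Int) : Decidable (Spec_get_longest_period_2 u out) := by unfold Spec_get_longest_period_2; infer_instance

-- ===== CLAIM (what is proved, stated in full; the proofs are below) =====
def Claim_equal_get_longest_period_2 : Prop := ∀ (u : String), Dom_get_longest_period_2 u → Spec_get_longest_period_2 u (get_longest_period_2 u)

-- ===== LEMMAS AND PROOFS =====

-- longest period-2 window ending at (exclusive) position e
def pvG (l : List Char) : Nat → Nat
  | 0 => 0
  | e + 1 => if 2 ≤ e ∧ l.getD e ' ' = l.getD (e - 2) ' ' then pvG l e + 1 else min (e + 1) 2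

-- running maximum of pvG over 1..e
def pvM (l : List Char) : Nat → Nat
  | 0 => 0
  | e + 1 => max (pvM l e) (pvG l (e + 1))

-- the window [i, i+m) has period 2
def pvGood (l : List Char) (i m : Nat) : Prop :=
  ∀ k, k + 2 < m → l.getD (i + k) ' ' = l.getD (i + k + 2) ' '

def pvGoodB (l : List Char) (i m : Nat) : Bool :=
  (List.range (m - 2)).all (fun t => l.getD (i + t) ' ' == l.getD (i + t + 2) ' ')

-- Nat model of A's two outer loops
def pvInner (l : List Char) (n i a : Nat) : Nat :=
  (List.range (n - i)).foldl (fun a t => if pvGoodB l i (t + 1) then max a (t + 1) else a) a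

def pvA (l : List Char) (n : Nat) : Nat :=
  (List.range n).foldl (fun a i => pvInner l n i a) 0

lemma pvGoodB_iff (l : List Char) (i m : Nat) : pvGoodB l i m = true ↔ pvGood l i m := by
  unfold pvGoodB pvGood
  simp only [List.all_eq_true, List.mem_range, beq_iff_eq]
  constructor
  · intro h k hk; exact h k (by omega)
  · intro h t ht; exact h t (by omega)

lemma pvG_le (l : List Char) : ∀ e, pvG l e ≤ e := by
  intro e; induction e with
  | zero => simp [pvG]
  | succ e ih => unfold pvG; split <;> omega

lemma pv_min_le_G (l : List Char) : ∀ e, min e 2 ≤ pvG l e := by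
  intro e; induction e with
  | zero => simp [pvG]
  | succ e ih => unfold pvG; split <;> omega

lemma pvGood_G (l : List Char) : ∀ e, pvGood l (e - pvG l e) (pvG l e) := by
  intro e; induction e with
  | zero => intro k hk; simp [pvG] at hk
  | succ e ih =>
    have hle := pvG_le l e
    unfold pvG
    split
    · rename_i hcond
      obtain ⟨he2, heq⟩ := hcond
      intro k hk
      rcases Nat.lt_or_ge (k + 2) (pvG l e) with h | h
      · have h1 : e + 1 - (pvG l e + 1) = e - pvG l e := by omega
        rw [h1]; exact ih k h
      · -- k + 2 = pvG l e
        have hk2 : k + 2 = pvG l e := by omega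
        have h2 : 2 ≤ pvG l e := by omega
        have h1 : e + 1 - (pvG l e + 1) + k = e - 2 := by omega
        have h3 : e + 1 - (pvG l e + 1) + k + 2 = e := by omega
        have h4 : e - 2 + 2 = e := by omega
        rw [h1, h4]; exact heq.symm
    · intro k hk; omega
lemma pvG_max (l : List Char) : ∀ e m, m ≤ e → pvGood l (e - m) m → m ≤ pvG l e := by
  intro e; induction e with
  | zero => intro m hm _; omega
  | succ e ih =>
    intro m hm hg
    by_cases h2 : m ≤ 2
    · have := pv_min_le_G l (e + 1); omega
    · have h2 : 2 < m := by omega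
      have hcond : l.getD e ' ' = l.getD (e - 2) ' ' := by
        have := hg (m - 3) (by omega)
        have h1 : e + 1 - m + (m - 3) = e - 2 := by omega
        have h3 : e + 1 - m + (m - 3) + 2 = e := by omega
        rw [h1, show e - 2 + 2 = e from by omega] at this; exact this.symm
      have he2 : 2 ≤ e := by omega
      have hstep : pvG l (e + 1) = pvG l e + 1 := by
        rw [pvG, if_pos ⟨he2, hcond⟩]
      have hg' : pvGood l (e - (m - 1)) (m - 1) := by
        intro k hk
        have h1 : e - (m - 1) = e + 1 - m := by omega
        rw [h1]; exact hg k (by omega)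
      have := ih (m - 1) (by omega) hg'
      omega

lemma pv_foldl_le {α : Type} (step : Nat → α → Nat) (c : Nat) (L : List α) :
    ∀ a, a ≤ c → (∀ b x, x ∈ L → b ≤ c → step b x ≤ c) → L.foldl step a ≤ c := by
  induction L with
  | nil => intro a h0 _; simpa using h0
  | cons x L ih =>
    intro a h0 hs
    simp only [List.foldl_cons]
    exact ih _ (hs a x (by simp) h0) (fun b y hy hb => hs b y (by simp [hy]) hb)

lemma pv_le_foldl {α : Type} (step : Nat → α → Nat) (L : List α) :
    ∀ a, (∀ b x, x ∈ L → b ≤ step b x) → a ≤ L.foldl step a := by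
  induction L with
  | nil => intro a _; simp
  | cons x L ih =>
    intro a hs
    simp only [List.foldl_cons]
    exact le_trans (hs a x (by simp)) (ih _ (fun b y hy => hs b y (by simp [hy])))

lemma pv_elem_le_foldl {α : Type} (step : Nat → α → Nat) (L : List α) :
    ∀ a (x : α), x ∈ L → ∀ v : Nat, (∀ b, v ≤ step b x) →
    (∀ b y, y ∈ L → b ≤ step b y) → v ≤ L.foldl step a := by
  induction L with
  | nil => intro a x hx; simp at hx
  | cons z L ih =>
    intro a x hx v hv hs
    simp only [List.foldl_cons]
    rcases List.mem_cons.mp hx with rfl | hx'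
    · exact le_trans (hv a) (pv_le_foldl step L _ (fun b y hy => hs b y (by simp [hy])))
    · exact ih _ x hx' v hv (fun b y hy => hs b y (by simp [hy]))

lemma pv_foldl_cast (sI : Int → Nat → Int) (sN : Nat → Nat → Nat) (L : List Nat)
    (h : ∀ (a : Nat) (k : Nat), k ∈ L → sI (↑a) k = ↑(sN a k)) :
    ∀ a : Nat, L.foldl sI ↑a = ↑(L.foldl sN a) := by
  induction L with
  | nil => intro a; simp
  | cons x L ih =>
    intro a
    simp only [List.foldl_cons]
    rw [h a x (by simp)]
    exact ih (fun a k hk => h a k (by simp [hk])) _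

lemma pvCheckP2_eq_all (sub : List Char) (ks : List Int) :
    pvCheckP2 sub ks = ks.all (fun k => PySem.List.pyGet? sub k == PySem.List.pyGet? sub (k + 2)) := by
  induction ks with
  | nil => rfl
  | cons k ks ih =>
    simp only [pvCheckP2, List.all_cons]
    by_cases h : PySem.List.pyGet? sub k = PySem.List.pyGet? sub (k + 2)
    · simp [h, ih]
    · simp [h]

lemma pv_body_eq (l : List Char) (i t a : Nat) (hi : i < l.length) (ht : t < l.length - i) :
    (if (if ((PySem.List.slice l (some (i : Int)) (some ((i : Int) + (t : Int) + 1))).length : Int) > 2 then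
          pvCheckP2 (PySem.List.slice l (some (i : Int)) (some ((i : Int) + (t : Int) + 1)))
            (List.map (fun (k : Nat) => (k : Int)) (List.range (((PySem.List.slice l (some (i : Int)) (some ((i : Int) + (t : Int) + 1))).length : Int) - 2).toNat))
        else true) = true
     then max (↑a) ((PySem.List.slice l (some (i : Int)) (some ((i : Int) + (t : Int) + 1))).length : Int)
     else (↑a : Int))
    = ↑(if pvGoodB l i (t + 1) then max a (t + 1) else a) := by
  have hsub : PySem.List.slice l (some (i : Int)) (some ((i : Int) + (t : Int) + 1))
      = (l.drop i).take (t + 1) := by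
    rw [show ((i : Int) + (t : Int) + 1) = ((i + t + 1 : Nat) : Int) by push_cast; ring]
    rw [PySem.List.slice_natCast]
    congr 1
    omega
  have hlen : ((l.drop i).take (t + 1)).length = t + 1 := by
    simp [List.length_take, List.length_drop]; omega
  rw [hsub, hlen]
  have hgood : (if ((t + 1 : Nat) : Int) > 2 then
      pvCheckP2 ((l.drop i).take (t + 1))
        (List.map (fun (k : Nat) => (k : Int)) (List.range ((((t + 1 : Nat) : Int)) - 2).toNat))
      else true) = pvGoodB l i (t + 1) := by
    by_cases h2 : t + 1 ≤ 2
    · rw [if_neg (by exact_mod_cast by omega)]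
      unfold pvGoodB
      rw [show t + 1 - 2 = 0 from by omega]
      simp
    · rw [if_pos (by exact_mod_cast by omega)]
      rw [pvCheckP2_eq_all, List.all_map]
      rw [show ((((t + 1 : Nat) : Int)) - 2).toNat = t - 1 by omega]
      unfold pvGoodB
      rw [show t + 1 - 2 = t - 1 from by omega]
      rw [Bool.eq_iff_iff]
      simp only [List.all_eq_true, List.mem_range, Function.comp]
      have e1 : ∀ k, k < t - 1 → PySem.List.pyGet? ((l.drop i).take (t + 1)) ↑k = some (l.getD (i + k) ' ') := by
        intro k hk
        rw [PySem.List.pyGet?_natCast]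
        rw [List.getElem?_take_of_lt (by omega), List.getElem?_drop]
        rw [List.getElem?_eq_getElem (by omega), List.getD_eq_getElem l ' ' (by omega)]
      have e2 : ∀ k, k < t - 1 → PySem.List.pyGet? ((l.drop i).take (t + 1)) ((k : Int) + 2) = some (l.getD (i + k + 2) ' ') := by
        intro k hk
        rw [show ((k : Int) + 2) = ((k + 2 : Nat) : Int) by push_cast; ring]
        rw [PySem.List.pyGet?_natCast]
        rw [List.getElem?_take_of_lt (by omega), List.getElem?_drop]
        rw [List.getElem?_eq_getElem (by omega), List.getD_eq_getElem l ' ' (by omega)]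
        congr 2
      constructor
      · intro h k hk
        have := h k hk
        rw [e1 k hk, e2 k hk] at this
        simpa using this
      · intro h k hk
        rw [e1 k hk, e2 k hk]
        simpa using h k hk
  rw [hgood]
  by_cases hg : pvGoodB l i (t + 1) = true
  · rw [if_pos hg, if_pos hg]; push_cast; omega
  · rw [if_neg hg, if_neg hg]

lemma pvA_eq (u : String) : get_longest_period_2 u = ↑(pvA u.toList u.toList.length) := by
  unfold get_longest_period_2
  by_cases hnil : u.toList = []
  · simp [hnil, pvA]
  · rw [if_neg hnil]
    simp only [PySem.List.pyRange_one, Int.sub_zero, Int.toNat_natCast, zero_add, List.foldl_map]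
    unfold pvA
    rw [show ((0:Int)) = ((0 : Nat) : Int) by norm_num]
    apply pv_foldl_cast
    intro a i hi
    have hi' : i < u.toList.length := List.mem_range.mp hi
    rw [show ((u.toList.length : Int) - (i : Int)).toNat = u.toList.length - i by omega]
    unfold pvInner
    apply pv_foldl_cast
    intro b t ht
    have ht' : t < u.toList.length - i := List.mem_range.mp ht
    exact pv_body_eq u.toList i t b hi' ht'
lemma pvB_fold (l : List Char) : ∀ e, e ≤ l.length →
    (List.range e).foldl (fun (st : Int × Int) (k : Nat) =>
      let cur : Int :=
        if 2 ≤ (k : Int) ∧ PySem.List.pyGet? l ↑k = PySem.List.pyGet? l (↑k - 2) then st.2 + 1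
        else min ((k : Int) + 1) 2
      (if cur > st.1 then cur else st.1, cur)) ((0 : Int), (0 : Int))
    = (↑(pvM l e), ↑(pvG l e)) := by
  intro e
  induction e with
  | zero => intro _; simp [pvM, pvG]
  | succ e ih =>
    intro he
    rw [List.range_succ, List.foldl_append, ih (by omega)]
    simp only [List.foldl_cons, List.foldl_nil]
    have hcond : (2 ≤ (e : Int) ∧ PySem.List.pyGet? l ↑e = PySem.List.pyGet? l (↑e - 2))
        ↔ (2 ≤ e ∧ l.getD e ' ' = l.getD (e - 2) ' ') := by
      constructor
      · rintro ⟨h2, heq⟩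
        have h2' : 2 ≤ e := by exact_mod_cast h2
        refine ⟨h2', ?_⟩
        rw [show ((e : Int) - 2) = ((e - 2 : Nat) : Int) by omega] at heq
        rw [PySem.List.pyGet?_natCast, PySem.List.pyGet?_natCast] at heq
        rw [List.getElem?_eq_getElem (by omega), List.getElem?_eq_getElem (by omega)] at heq
        simp only [Option.some_inj] at heq
        rw [List.getD_eq_getElem l ' ' (by omega), List.getD_eq_getElem l ' ' (by omega)]
        exact heq
      · rintro ⟨h2, heq⟩
        refine ⟨by exact_mod_cast h2, ?_⟩
        rw [show ((e : Int) - 2) = ((e - 2 : Nat) : Int) by omega]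
        rw [PySem.List.pyGet?_natCast, PySem.List.pyGet?_natCast]
        rw [List.getElem?_eq_getElem (by omega), List.getElem?_eq_getElem (by omega)]
        rw [List.getD_eq_getElem l ' ' (by omega), List.getD_eq_getElem l ' ' (by omega)] at heq
        simp [heq]
    by_cases hc : 2 ≤ e ∧ l.getD e ' ' = l.getD (e - 2) ' '
    · rw [if_pos (hcond.mpr hc)]
      have hG : pvG l (e + 1) = pvG l e + 1 := by rw [pvG, if_pos hc]
      have hM : pvM l (e + 1) = max (pvM l e) (pvG l (e + 1)) := rfl
      simp only [hG, hM, Prod.mk.injEq]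
      constructor
      · split <;> rename_i h <;> push_cast <;> omega
      · push_cast; ring
    · rw [if_neg (fun h => hc (hcond.mp h))]
      have hG : pvG l (e + 1) = min (e + 1) 2 := by rw [pvG, if_neg hc]
      have hM : pvM l (e + 1) = max (pvM l e) (pvG l (e + 1)) := rfl
      simp only [hG, hM, Prod.mk.injEq]
      constructor
      · split <;> rename_i h <;> push_cast <;> omega
      · push_cast; omega

lemma pvB_eq (u : String) : get_longest_period_2_alt u = ↑(pvM u.toList u.toList.length) := by
  unfold get_longest_period_2_alt
  simp only [PySem.List.pyRange_one, Int.sub_zero, Int.toNat_natCast, zero_add, List.foldl_map]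
  rw [pvB_fold u.toList u.toList.length le_rfl]

lemma pvM_mono (l : List Char) : ∀ {e e' : Nat}, e ≤ e' → pvM l e ≤ pvM l e' := by
  intro e e' h
  induction e' with
  | zero => simp [Nat.le_zero.mp h]
  | succ d ih =>
    rcases Nat.lt_or_ge e (d + 1) with h' | h'
    · exact le_trans (ih (by omega)) (le_max_left _ _)
    · rw [show e = d + 1 from by omega]

lemma pvG_le_M (l : List Char) {e n : Nat} (h : e < n) : pvG l (e + 1) ≤ pvM l n := by
  have h1 : pvG l (e + 1) ≤ pvM l (e + 1) := le_max_right _ _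
  exact le_trans h1 (pvM_mono l (by omega))

lemma pvG_le_A (l : List Char) {e : Nat} (h : e < l.length) :
    pvG l (e + 1) ≤ pvA l l.length := by
  set n := l.length with hn
  set m := pvG l (e + 1) with hm
  rcases Nat.eq_zero_or_pos m with h0 | h0
  · omega
  have hml : m ≤ e + 1 := pvG_le l (e + 1)
  have hgood : pvGood l (e + 1 - m) m := by
    have := pvGood_G l (e + 1); rwa [← hm] at this
  have hmono : ∀ (b : Nat) (y : Nat), y ∈ List.range n → b ≤ pvInner l n y b := by
    intro b y _
    exact pv_le_foldl _ _ b (fun c t _ => by split <;> omega)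
  apply pv_elem_le_foldl _ (List.range n) 0 (e + 1 - m) (by simp; omega) m _ hmono
  intro b
  apply pv_elem_le_foldl _ (List.range (n - (e + 1 - m))) b (m - 1) (by simp; omega) m _
    (fun c t _ => by split <;> omega)
  intro c
  have hgb : pvGoodB l (e + 1 - m) (m - 1 + 1) = true := by
    rw [pvGoodB_iff, show m - 1 + 1 = m from by omega]
    exact hgood
  rw [if_pos hgb]
  omega

lemma pvA_eq_M (l : List Char) : pvA l l.length = pvM l l.length := by
  set n := l.length with hn
  apply Nat.le_antisymm
  · apply pv_foldl_le _ (pvM l n) _ 0 (by omega)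
    intro b i hi hb
    have hi' : i < n := List.mem_range.mp hi
    apply pv_foldl_le _ (pvM l n) _ b hb
    intro c t ht hc
    have ht' : t < n - i := List.mem_range.mp ht
    split
    · rename_i hg
      have hgood : pvGood l i (t + 1) := (pvGoodB_iff l i (t + 1)).mp hg
      have h1 : t + 1 ≤ pvG l (i + t + 1) := by
        apply pvG_max l (i + t + 1) (t + 1) (by omega)
        rw [show i + t + 1 - (t + 1) = i from by omega]
        exact hgood
      have h2 : pvG l (i + t + 1) ≤ pvM l n := pvG_le_M l (by omega)
      omega
    · exact hc
  · -- pvM l n ≤ pvA l n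
    have key : ∀ e, e ≤ n → pvM l e ≤ pvA l n := by
      intro e
      induction e with
      | zero => intro _; simp [pvM]
      | succ d ih =>
        intro hd
        have h1 := ih (by omega)
        have h2 : pvG l (d + 1) ≤ pvA l n := pvG_le_A l (by omega)
        show max (pvM l d) (pvG l (d + 1)) ≤ pvA l n
        omega
    exact key n le_rfl

-- ===== VERDICT (by name: the statement is the Claim_ definition above) =====
theorem get_longest_period_2_spec : Claim_equal_get_longest_period_2 := by
  intro u _
  unfold Spec_get_longest_period_2
  rw [pvA_eq, pvB_eq, pvA_eq_M]
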